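-- pv_equiv track=rewrite | github.com/leetcode-notes/daily-algorithms-practice | topcoder/cellRemoval.py | bfs
-- ===== SOURCE A (Python) =====
-- from collections import defaultdict, deque
--
-- def bfs(tree, nodes_list,  kill):
--     queue = deque([0])
--     count = 0
--     while queue:
--         cur = queue.popleft()
--         if cur != kill:
--             if cur not in tree:
--                 count += 1
--             else:
--                 for child in tree[cur]:
--                     queue.append(child)
--     return count
-- ===== SOURCE B (Python) =====
-- def bfs(tree, nodes_list, kill):
--     def dfs(cur):
--         if cur == kill:
--             return 0
--         if cur not in tree:
--             return 1
--         return sum(dfs(child) for child in tree[cur])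
--     return dfs(0)
-- ===== Notes on version B (the rewrite author's own statement) =====
-- stated objective: simpler
-- what changed: Replaces the iterative deque-based level-order loop accumulating a counter with a recursive DFS helper that returns the live-leaf count of each subtree and sums over children.
import Mathlib
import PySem

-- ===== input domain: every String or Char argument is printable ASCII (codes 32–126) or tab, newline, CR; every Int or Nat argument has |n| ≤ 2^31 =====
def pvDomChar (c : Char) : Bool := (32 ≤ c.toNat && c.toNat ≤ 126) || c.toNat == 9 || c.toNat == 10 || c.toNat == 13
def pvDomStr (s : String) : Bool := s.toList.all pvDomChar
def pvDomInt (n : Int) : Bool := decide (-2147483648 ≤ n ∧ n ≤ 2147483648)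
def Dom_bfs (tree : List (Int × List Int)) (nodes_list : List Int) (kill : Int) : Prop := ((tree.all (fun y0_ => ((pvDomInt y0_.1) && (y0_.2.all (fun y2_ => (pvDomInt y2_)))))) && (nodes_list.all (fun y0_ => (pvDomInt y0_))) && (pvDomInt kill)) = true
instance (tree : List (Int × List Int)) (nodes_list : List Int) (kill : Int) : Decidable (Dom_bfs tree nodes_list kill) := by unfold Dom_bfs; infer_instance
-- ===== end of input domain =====

-- B replaces A's iterative deque-based level-order loop by a recursive DFS that sums live-leaf
-- counts per subtree (objective: simpler).

-- Python dict lookup on the association list (first match), shared primitive of both ports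
def pyLookup : List (Int × List Int) → Int → Option (List Int)
  | [], _ => none
  | (k, v) :: rest, x => if k = x then some v else pyLookup rest x

-- total number of child entries in the tree (used only to size the ports' termination fuel)
def childSum (tree : List (Int × List Int)) : Nat := (tree.flatMap (fun p => p.2)).length

-- ===== PORT A =====
-- A's while-loop over the deque; the Nat argument is termination fuel only (Python's loop can
-- diverge on cyclic input; Pre_bfs below guarantees the fuel passed by `bfs` is never exhausted)
def bfsLoop (tree : List (Int × List Int)) (kill : Int) : Nat → List Int → Int → Int
  | 0, _, count => count
  | _ + 1, [], count => count
  | f + 1, cur :: q, count =>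
    if cur ≠ kill then
      match pyLookup tree cur with
      | none => bfsLoop tree kill f q (count + 1)
      | some cs => bfsLoop tree kill f (q ++ cs) count
    else bfsLoop tree kill f q count

def bfs (tree : List (Int × List Int)) (nodes_list : List Int) (kill : Int) : Int :=
  bfsLoop tree kill ((childSum tree + 1) ^ tree.length + 1) [0] 0

-- ===== PORT B =====
-- B's recursive dfs helper; the Nat argument is termination fuel only (on inputs satisfying
-- Pre_bfs the recursion depth is at most tree.length + 1, so the fuel is never exhausted)
def dfsF (tree : List (Int × List Int)) (kill : Int) : Nat → Int → Int
  | 0, _ => 0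
  | f + 1, cur =>
    if cur = kill then 0
    else
      match pyLookup tree cur with
      | none => 1
      | some cs => (cs.map (dfsF tree kill f)).sum

def bfs_alt (tree : List (Int × List Int)) (nodes_list : List Int) (kill : Int) : Int :=
  dfsF tree kill (tree.length + 1) 0

-- ===== PRECONDITION & SPEC =====
-- the children a node feeds back into the queue: none for the killed node, else its dict entry
def childrenOf (tree : List (Int × List Int)) (kill : Int) (x : Int) : List Int :=
  if x = kill then [] else (pyLookup tree x).getD []

-- append an element if absent (set insertion keeping order and Nodup)
def insEnd (acc : List Int) (c : Int) : List Int := if c ∈ acc then acc else acc ++ [c]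

-- one expansion step: add every child of every current member
def grow (tree : List (Int × List Int)) (kill : Int) (s : List Int) : List Int :=
  s.foldl (fun acc x => (childrenOf tree kill x).foldl insEnd acc) s

def reachAux (tree : List (Int × List Int)) (kill : Int) : Nat → List Int → List Int
  | 0, s => s
  | n + 1, s => reachAux tree kill n (grow tree kill s)

-- all nodes reachable from x through non-killed nodes (childSum+1 expansion steps saturate)
def reachSet (tree : List (Int × List Int)) (kill : Int) (x : Int) : List Int :=
  reachAux tree kill (childSum tree + 1) [x]

-- Pre_bfs holds exactly when Python A's BFS terminates: it excludes precisely the inputs on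
-- which a cycle is reachable from node 0 through non-killed nodes, where A loops forever
-- (and never returns a value); no input on which A returns is excluded.
def Pre_bfs (tree : List (Int × List Int)) (nodes_list : List Int) (kill : Int) : Prop :=
  ∀ x ∈ reachSet tree kill 0, ∀ c ∈ childrenOf tree kill x, x ∉ reachSet tree kill c

instance (tree : List (Int × List Int)) (nodes_list : List Int) (kill : Int) : Decidable (Pre_bfs tree nodes_list kill) := by unfold Pre_bfs; infer_instance

def pvWitness_bfs : (List (Int × List Int)) × List Int × Int := ([(0, [1, 2]), (1, [3, 4])], [0, 1, 2, 3, 4], 2)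

def Spec_bfs (tree : List (Int × List Int)) (nodes_list : List Int) (kill : Int) (out : Int) : Prop := out = bfs_alt tree nodes_list kill
instance (tree : List (Int × List Int)) (nodes_list : List Int) (kill : Int) (out : Int) : Decidable (Spec_bfs tree nodes_list kill out) := by unfold Spec_bfs; infer_instance

-- ===== CLAIM (what is proved, stated in full; the proofs are below) =====
def Claim_equal_bfs : Prop := ∀ (tree : List (Int × List Int)) (nodes_list : List Int) (kill : Int), Dom_bfs tree nodes_list kill → Pre_bfs tree nodes_list kill → Spec_bfs tree nodes_list kill (bfs tree nodes_list kill)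

-- ===== LEMMAS AND PROOFS =====

-- ---- elementary facts about pyLookup ----
theorem pyLookup_decomp {tree : List (Int × List Int)} {k : Int} {v : List Int}
    (h : pyLookup tree k = some v) : ∃ l1 l2, tree = l1 ++ (k, v) :: l2 := by
  induction tree with
  | nil => simp [pyLookup] at h
  | cons p rest ih =>
    obtain ⟨a, b⟩ := p
    by_cases hk : a = k
    · subst hk
      simp [pyLookup] at h
      exact ⟨[], rest, by simp [h]⟩
    · simp [pyLookup, hk] at h
      obtain ⟨l1, l2, hl⟩ := ih h
      exact ⟨(a, b) :: l1, l2, by simp [hl]⟩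

theorem mem_of_pyLookup {tree : List (Int × List Int)} {k : Int} {cs : List Int}
    (h : pyLookup tree k = some cs) : (k, cs) ∈ tree := by
  obtain ⟨l1, l2, hl⟩ := pyLookup_decomp h
  subst hl; simp

theorem csLen_le {tree : List (Int × List Int)} {k : Int} {cs : List Int}
    (h : (k, cs) ∈ tree) : cs.length ≤ childSum tree := by
  induction tree with
  | nil => simp at h
  | cons p rest ih =>
    rcases List.mem_cons.mp h with h | h
    · cases h; simp [childSum]
    · have := ih h
      simp [childSum] at *
      omega

theorem childrenOf_sub {tree : List (Int × List Int)} {kill x c : Int}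
    (h : c ∈ childrenOf tree kill x) : c ∈ tree.flatMap (fun p => p.2) := by
  unfold childrenOf at h
  split at h
  · simp at h
  · cases hl : pyLookup tree x with
    | none => rw [hl] at h; simp at h
    | some cs =>
      rw [hl] at h; simp at h
      exact List.mem_flatMap.mpr ⟨(x, cs), mem_of_pyLookup hl, h⟩

-- ---- insEnd / grow: prefix extension, membership, Nodup ----
theorem insEnd_append (acc : List Int) (c : Int) : ∃ t, insEnd acc c = acc ++ t := by
  unfold insEnd; split_ifs
  · exact ⟨[], by simp⟩
  · exact ⟨[c], rfl⟩

theorem foldl_ext_append {α : Type} (f : List Int → α → List Int)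
    (h : ∀ acc x, ∃ t, f acc x = acc ++ t) :
    ∀ (l : List α) (acc : List Int), ∃ t, l.foldl f acc = acc ++ t := by
  intro l
  induction l with
  | nil => exact fun acc => ⟨[], by simp⟩
  | cons x l ih =>
    intro acc
    obtain ⟨t1, h1⟩ := h acc x
    obtain ⟨t2, h2⟩ := ih (f acc x)
    exact ⟨t1 ++ t2, by rw [List.foldl_cons, h2, h1, List.append_assoc]⟩

theorem grow_append (tree : List (Int × List Int)) (kill : Int) (s : List Int) :
    ∃ t, grow tree kill s = s ++ t := by
  unfold grow
  exact foldl_ext_append _ (fun acc x => foldl_ext_append insEnd insEnd_append _ acc) s s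

theorem mem_insEnd {y : Int} {acc : List Int} {c : Int} :
    y ∈ insEnd acc c ↔ y ∈ acc ∨ y = c := by
  unfold insEnd; split_ifs with h
  · constructor
    · exact Or.inl
    · rintro (hy | rfl) <;> [exact hy; exact h]
  · simp

theorem mem_foldl_insEnd {y : Int} : ∀ (l : List Int) (acc : List Int),
    y ∈ l.foldl insEnd acc ↔ y ∈ acc ∨ y ∈ l := by
  intro l
  induction l with
  | nil => simp
  | cons x l ih =>
    intro acc
    rw [List.foldl_cons, ih, mem_insEnd]
    simp
    tauto

theorem mem_grow {tree : List (Int × List Int)} {kill : Int} {y : Int} {s : List Int} :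
    y ∈ grow tree kill s ↔ y ∈ s ∨ ∃ x ∈ s, y ∈ childrenOf tree kill x := by
  have gen : ∀ (l : List Int) (acc : List Int),
      y ∈ l.foldl (fun acc x => (childrenOf tree kill x).foldl insEnd acc) acc ↔
        y ∈ acc ∨ ∃ x ∈ l, y ∈ childrenOf tree kill x := by
    intro l
    induction l with
    | nil => simp
    | cons x l ih =>
      intro acc
      rw [List.foldl_cons, ih, mem_foldl_insEnd]
      simp
      tauto
  exact gen s s

theorem nodup_insEnd {acc : List Int} {c : Int} (h : acc.Nodup) : (insEnd acc c).Nodup := by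
  unfold insEnd; split_ifs with hc
  · exact h
  · simp [List.nodup_append, h]
    exact fun a ha hac => hc (hac ▸ ha)

theorem nodup_foldl_insEnd : ∀ (l : List Int) {acc : List Int}, acc.Nodup → (l.foldl insEnd acc).Nodup := by
  intro l
  induction l with
  | nil => exact fun h => h
  | cons x l ih => exact fun h => ih (nodup_insEnd h)

theorem nodup_grow {tree : List (Int × List Int)} {kill : Int} {s : List Int}
    (h : s.Nodup) : (grow tree kill s).Nodup := by
  unfold grow
  have gen : ∀ (l : List Int) {acc : List Int}, acc.Nodup →
      (l.foldl (fun acc x => (childrenOf tree kill x).foldl insEnd acc) acc).Nodup := by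
    intro l
    induction l with
    | nil => exact fun h => h
    | cons x l ih => exact fun h => ih (nodup_foldl_insEnd _ h)
  exact gen s h

theorem nodup_reachAux {tree : List (Int × List Int)} {kill : Int} :
    ∀ (n : Nat) {s : List Int}, s.Nodup → (reachAux tree kill n s).Nodup := by
  intro n
  induction n with
  | zero => exact fun h => h
  | succ n ih => exact fun h => ih (nodup_grow h)

theorem reachAux_append (tree : List (Int × List Int)) (kill : Int) :
    ∀ (n : Nat) (s : List Int), ∃ t, reachAux tree kill n s = s ++ t := by
  intro n
  induction n with
  | zero => exact fun s => ⟨[], by simp [reachAux]⟩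
  | succ n ih =>
    intro s
    obtain ⟨t1, h1⟩ := grow_append tree kill s
    obtain ⟨t2, h2⟩ := ih (grow tree kill s)
    refine ⟨t1 ++ t2, ?_⟩
    rw [show reachAux tree kill (n + 1) s = reachAux tree kill n (grow tree kill s) from rfl,
      h2, h1, List.append_assoc]

-- ---- saturation: reachSet is closed under childrenOf ----
theorem reachAux_of_fixed {tree : List (Int × List Int)} {kill : Int} {s : List Int}
    (h : grow tree kill s = s) : ∀ n, reachAux tree kill n s = s := by
  intro n
  induction n with
  | zero => rfl
  | succ n ih => simp [reachAux, h, ih]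

theorem grow_progress {tree : List (Int × List Int)} {kill : Int} :
    ∀ (n : Nat) (s : List Int),
      grow tree kill (reachAux tree kill n s) = reachAux tree kill n s ∨
        s.length + n ≤ (reachAux tree kill n s).length := by
  intro n
  induction n with
  | zero => exact fun s => Or.inr (by simp [reachAux])
  | succ n ih =>
    intro s
    by_cases hg : grow tree kill s = s
    · left
      rw [show reachAux tree kill (n + 1) s = reachAux tree kill n (grow tree kill s) from rfl,
        hg, reachAux_of_fixed hg, hg]
    · rcases ih (grow tree kill s) with h | h
      · left; exact h
      · right
        obtain ⟨t, ht⟩ := grow_append tree kill s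
        have htne : t ≠ [] := by rintro rfl; simp at ht; exact hg ht
        have : s.length + 1 ≤ (grow tree kill s).length := by
          rw [ht]; simp
          exact Nat.pos_of_ne_zero (fun h0 => htne (List.length_eq_zero_iff.mp h0))
        calc s.length + (n + 1) ≤ (grow tree kill s).length + n := by omega
          _ ≤ _ := h

theorem reachAux_universe {tree : List (Int × List Int)} {kill : Int} :
    ∀ (n : Nat) (s : List Int) (y : Int), y ∈ reachAux tree kill n s →
      y ∈ s ∨ y ∈ tree.flatMap (fun p => p.2) := by
  intro n
  induction n with
  | zero => exact fun s y h => Or.inl h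
  | succ n ih =>
    intro s y h
    rcases ih (grow tree kill s) y h with h | h
    · rcases mem_grow.mp h with h | ⟨x, _, hc⟩
      · exact Or.inl h
      · exact Or.inr (childrenOf_sub hc)
    · exact Or.inr h

theorem nodup_length_le {u l : List Int} (hn : u.Nodup) (hs : ∀ y ∈ u, y ∈ l) :
    u.length ≤ l.length := by
  have h1 : u.length = u.toFinset.card := (List.toFinset_card_of_nodup hn).symm
  have h2 : u.toFinset ⊆ l.toFinset := by
    intro a ha
    simp at ha ⊢
    exact hs a ha
  calc u.length = u.toFinset.card := h1
    _ ≤ l.toFinset.card := Finset.card_le_card h2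
    _ ≤ l.length := l.toFinset_card_le

theorem reachSet_closed {tree : List (Int × List Int)} {kill : Int} (x : Int) :
    grow tree kill (reachSet tree kill x) = reachSet tree kill x := by
  rcases grow_progress (childSum tree + 1) [x] with h | h
  · exact h
  · exfalso
    have hn : (reachSet tree kill x).Nodup := nodup_reachAux _ (by simp)
    have hu : ∀ y ∈ reachSet tree kill x, y ∈ x :: tree.flatMap (fun p => p.2) := by
      intro y hy
      rcases reachAux_universe _ [x] y hy with h | h
      · simp at h; simp [h]
      · simp [h]
    have hlen := nodup_length_le hn hu
    rw [show (x :: tree.flatMap (fun p => p.2)).length = childSum tree + 1 by simp [childSum]]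
      at hlen
    unfold reachSet at hlen
    simp at h
    omega

theorem self_mem_reachSet (tree : List (Int × List Int)) (kill : Int) (x : Int) :
    x ∈ reachSet tree kill x := by
  obtain ⟨t, ht⟩ := reachAux_append tree kill (childSum tree + 1) [x]
  unfold reachSet
  rw [ht]; simp

theorem reachSet_step {tree : List (Int × List Int)} {kill : Int} {x y c : Int}
    (hy : y ∈ reachSet tree kill x) (hc : c ∈ childrenOf tree kill y) :
    c ∈ reachSet tree kill x := by
  rw [← reachSet_closed x]
  exact mem_grow.mpr (Or.inr ⟨y, hy, hc⟩)

-- reachability as a Prop, to transfer membership between reach sets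
inductive Reach (tree : List (Int × List Int)) (kill : Int) : Int → Int → Prop
  | refl (a : Int) : Reach tree kill a a
  | step {a b c : Int} : Reach tree kill a b → c ∈ childrenOf tree kill b → Reach tree kill a c

theorem reachAux_sound {tree : List (Int × List Int)} {kill : Int} {a : Int} :
    ∀ (n : Nat) (s : List Int), (∀ z ∈ s, Reach tree kill a z) →
      ∀ y ∈ reachAux tree kill n s, Reach tree kill a y := by
  intro n
  induction n with
  | zero => exact fun s hs y hy => hs y hy
  | succ n ih =>
    intro s hs y hy
    refine ih (grow tree kill s) ?_ y hy
    intro z hz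
    rcases mem_grow.mp hz with hz | ⟨x, hx, hc⟩
    · exact hs z hz
    · exact Reach.step (hs x hx) hc

theorem reachSet_sound {tree : List (Int × List Int)} {kill : Int} {c y : Int}
    (h : y ∈ reachSet tree kill c) : Reach tree kill c y := by
  refine reachAux_sound _ [c] ?_ y h
  intro z hz
  simp at hz
  subst hz
  exact Reach.refl _

theorem reach_transfer {tree : List (Int × List Int)} {kill : Int} {x c y : Int}
    (h : Reach tree kill c y) (hc : c ∈ reachSet tree kill x) : y ∈ reachSet tree kill x := by
  induction h with
  | refl => exact hc
  | step _ hcb ih => exact reachSet_step ih hcb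

theorem reachSet_sub {tree : List (Int × List Int)} {kill : Int} {x c : Int}
    (hc : c ∈ reachSet tree kill x) : ∀ y ∈ reachSet tree kill c, y ∈ reachSet tree kill x :=
  fun _ hy => reach_transfer (reachSet_sound hy) hc

-- ---- the rank: number of reachable live keys; strictly decreases along edges under Pre ----
def pKey (tree : List (Int × List Int)) (kill : Int) (y : Int) : Bool :=
  decide (y ≠ kill) && (pyLookup tree y).isSome

def kRank (tree : List (Int × List Int)) (kill : Int) (x : Int) : Nat :=
  ((reachSet tree kill x).filter (pKey tree kill)).length

theorem kRank_le (tree : List (Int × List Int)) (kill : Int) (x : Int) :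
    kRank tree kill x ≤ tree.length := by
  have hn : ((reachSet tree kill x).filter (pKey tree kill)).Nodup :=
    (nodup_reachAux _ (by simp)).filter _
  have hs : ∀ y ∈ (reachSet tree kill x).filter (pKey tree kill), y ∈ tree.map Prod.fst := by
    intro y hy
    have hp := List.of_mem_filter hy
    unfold pKey at hp
    simp at hp
    obtain ⟨cs, hcs⟩ := Option.isSome_iff_exists.mp hp.2
    exact List.mem_map.mpr ⟨(y, cs), mem_of_pyLookup hcs, rfl⟩
  have := nodup_length_le hn hs
  unfold kRank
  simpa using this

theorem kRank_pos {tree : List (Int × List Int)} {kill : Int} {x : Int}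
    (hx : pKey tree kill x = true) : 1 ≤ kRank tree kill x := by
  have : x ∈ (reachSet tree kill x).filter (pKey tree kill) :=
    List.mem_filter.mpr ⟨self_mem_reachSet tree kill x, hx⟩
  have := List.length_pos_of_mem this
  unfold kRank
  omega

theorem kRank_lt {tree : List (Int × List Int)} {nodes_list : List Int} {kill : Int} {x c : Int}
    (hpre : Pre_bfs tree nodes_list kill) (hx0 : x ∈ reachSet tree kill 0)
    (hx : pKey tree kill x = true) (hc : c ∈ childrenOf tree kill x) :
    kRank tree kill c < kRank tree kill x := by
  have hcx : c ∈ reachSet tree kill x := reachSet_step (self_mem_reachSet tree kill x) hc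
  have hsub := reachSet_sub hcx
  have hnx : x ∉ reachSet tree kill c := hpre x hx0 c hc
  have hnc : ((reachSet tree kill c).filter (pKey tree kill)).Nodup :=
    (nodup_reachAux _ (by simp)).filter _
  have hnX : ((reachSet tree kill x).filter (pKey tree kill)).Nodup :=
    (nodup_reachAux _ (by simp)).filter _
  have hcard : ∀ u : List Int, u.Nodup → u.length = u.toFinset.card :=
    fun u hu => (List.toFinset_card_of_nodup hu).symm
  unfold kRank
  rw [hcard _ hnc, hcard _ hnX]
  apply Finset.card_lt_card
  constructor
  · intro a ha
    simp [List.mem_filter] at ha ⊢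
    exact ⟨hsub a ha.1, ha.2⟩
  · intro hcon
    have hxin : x ∈ ((reachSet tree kill x).filter (pKey tree kill)).toFinset := by
      simp [List.mem_filter]
      exact ⟨self_mem_reachSet tree kill x, hx⟩
    have := hcon hxin
    simp [List.mem_filter] at this
    exact hnx this.1

theorem reach0_children {tree : List (Int × List Int)} {kill : Int} {x c : Int}
    (hx : x ∈ reachSet tree kill 0) (hc : c ∈ childrenOf tree kill x) :
    c ∈ reachSet tree kill 0 := reachSet_step hx hc

theorem childrenOf_eq {tree : List (Int × List Int)} {kill cur : Int} {cs : List Int}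
    (hk : cur ≠ kill) (hl : pyLookup tree cur = some cs) : childrenOf tree kill cur = cs := by
  simp [childrenOf, hk, hl]

-- ---- fuel irrelevance of dfsF once the fuel exceeds the node's rank ----
theorem dfs_stable {tree : List (Int × List Int)} {nodes_list : List Int} {kill : Int}
    (hpre : Pre_bfs tree nodes_list kill) :
    ∀ n cur f g, cur ∈ reachSet tree kill 0 → kRank tree kill cur ≤ n →
      kRank tree kill cur < f → kRank tree kill cur < g →
      dfsF tree kill f cur = dfsF tree kill g cur := by
  intro n
  induction n with
  | zero =>
    intro cur f g hcur hn hf hg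
    obtain ⟨f', rfl⟩ : ∃ f', f = f' + 1 := ⟨f - 1, by omega⟩
    obtain ⟨g', rfl⟩ : ∃ g', g = g' + 1 := ⟨g - 1, by omega⟩
    by_cases hk : cur = kill
    · simp [dfsF, hk]
    · cases hlook : pyLookup tree cur with
      | none => simp [dfsF, hk, hlook]
      | some cs =>
        have hp : pKey tree kill cur = true := by simp [pKey, hk, hlook]
        exact absurd (kRank_pos hp) (by omega)
  | succ n ih =>
    intro cur f g hcur hn hf hg
    obtain ⟨f', rfl⟩ : ∃ f', f = f' + 1 := ⟨f - 1, by omega⟩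
    obtain ⟨g', rfl⟩ : ∃ g', g = g' + 1 := ⟨g - 1, by omega⟩
    by_cases hk : cur = kill
    · simp [dfsF, hk]
    · cases hlook : pyLookup tree cur with
      | none => simp [dfsF, hk, hlook]
      | some cs =>
        have hp : pKey tree kill cur = true := by simp [pKey, hk, hlook]
        simp only [dfsF, hk, if_false, hlook]
        congr 1
        apply List.map_congr_left
        intro c hc
        have hcch : c ∈ childrenOf tree kill cur := by rw [childrenOf_eq hk hlook]; exact hc
        have hlt := kRank_lt hpre hcur hp hcch
        exact ih c f' g' (reach0_children hcur hcch) (by omega) (by omega) (by omega)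

-- ---- the potential function bounding the remaining loop iterations ----
def wSum (tree : List (Int × List Int)) (kill : Int) (q : List Int) : Nat :=
  (q.map (fun x => (childSum tree + 1) ^ kRank tree kill x)).sum

theorem wSum_cons (tree : List (Int × List Int)) (kill : Int) (x : Int) (q : List Int) :
    wSum tree kill (x :: q) = (childSum tree + 1) ^ kRank tree kill x + wSum tree kill q := by
  simp [wSum]

theorem wSum_append (tree : List (Int × List Int)) (kill : Int) (q r : List Int) :
    wSum tree kill (q ++ r) = wSum tree kill q + wSum tree kill r := by
  simp [wSum]

theorem w_children_lt {tree : List (Int × List Int)} {nodes_list : List Int} {kill k : Int}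
    {cs : List Int} (hpre : Pre_bfs tree nodes_list kill) (hk0 : k ∈ reachSet tree kill 0)
    (hk : k ≠ kill) (h : pyLookup tree k = some cs) :
    wSum tree kill cs < (childSum tree + 1) ^ kRank tree kill k := by
  have hp : pKey tree kill k = true := by simp [pKey, hk, h]
  obtain ⟨m', hm⟩ : ∃ m', kRank tree kill k = m' + 1 :=
    ⟨kRank tree kill k - 1, by have := kRank_pos hp; omega⟩
  have hterm : ∀ y ∈ cs.map (fun x => (childSum tree + 1) ^ kRank tree kill x),
      y ≤ (childSum tree + 1) ^ m' := by
    intro y hy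
    simp at hy
    obtain ⟨c, hc, rfl⟩ := hy
    have hcch : c ∈ childrenOf tree kill k := by rw [childrenOf_eq hk h]; exact hc
    have := kRank_lt hpre hk0 hp hcch
    exact Nat.pow_le_pow_right (by omega) (by omega)
  have hsum : wSum tree kill cs ≤ cs.length * (childSum tree + 1) ^ m' := by
    have := List.sum_le_card_nsmul _ _ hterm
    simpa [wSum, smul_eq_mul] using this
  have hlen : cs.length ≤ childSum tree := csLen_le (mem_of_pyLookup h)
  have hpow : (0:Nat) < (childSum tree + 1) ^ m' := Nat.pow_pos (by omega)
  calc wSum tree kill cs ≤ cs.length * (childSum tree + 1) ^ m' := hsum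
    _ ≤ childSum tree * (childSum tree + 1) ^ m' := Nat.mul_le_mul_right _ hlen
    _ < (childSum tree + 1) * (childSum tree + 1) ^ m' := by
        exact Nat.mul_lt_mul_of_lt_of_le (by omega) (le_refl _) hpow
    _ = (childSum tree + 1) ^ kRank tree kill k := by rw [hm, pow_succ]; ring

-- ---- the BFS loop computes the sum of the DFS values of the queue ----
theorem bfs_to_dfs {tree : List (Int × List Int)} {nodes_list : List Int} {kill : Int}
    (hpre : Pre_bfs tree nodes_list kill) :
    ∀ f q count, (∀ y ∈ q, y ∈ reachSet tree kill 0) → wSum tree kill q < f →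
      bfsLoop tree kill f q count
        = count + (q.map (dfsF tree kill (tree.length + 1))).sum := by
  intro f
  induction f with
  | zero => intro q count hq hw; omega
  | succ f ih =>
    intro q count hq hw
    cases q with
    | nil => simp [bfsLoop]
    | cons cur rest =>
      rw [wSum_cons] at hw
      have hrest : ∀ y ∈ rest, y ∈ reachSet tree kill 0 := fun y hy => hq y (by simp [hy])
      have hcur0 : cur ∈ reachSet tree kill 0 := hq cur (by simp)
      have hpow : (0:Nat) < (childSum tree + 1) ^ kRank tree kill cur := Nat.pow_pos (by omega)
      by_cases hk : cur = kill
      · simp only [bfsLoop, hk, ne_eq, not_true_eq_false, if_false]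
        rw [ih rest count hrest (by omega)]
        have : dfsF tree kill (tree.length + 1) kill = 0 := by simp [dfsF]
        simp [this]
      · simp only [bfsLoop, ne_eq, hk, not_false_eq_true, if_true]
        cases hlook : pyLookup tree cur with
        | none =>
          simp only [hlook]
          rw [ih rest (count + 1) hrest (by omega)]
          have : dfsF tree kill (tree.length + 1) cur = 1 := by simp [dfsF, hk, hlook]
          simp [this]; ring
        | some cs =>
          have hcs : wSum tree kill cs < (childSum tree + 1) ^ kRank tree kill cur :=
            w_children_lt hpre hcur0 hk hlook
          have hcsr : ∀ y ∈ cs, y ∈ reachSet tree kill 0 := by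
            intro y hy
            exact reach0_children hcur0 (by rw [childrenOf_eq hk hlook]; exact hy)
          have hqa : ∀ y ∈ rest ++ cs, y ∈ reachSet tree kill 0 := by
            intro y hy
            rcases List.mem_append.mp hy with h | h
            exacts [hrest y h, hcsr y h]
          simp only [hlook]
          rw [ih (rest ++ cs) count hqa (by rw [wSum_append]; omega)]
          have hp : pKey tree kill cur = true := by simp [pKey, hk, hlook]
          have hcur : dfsF tree kill (tree.length + 1) cur
              = (cs.map (dfsF tree kill (tree.length + 1))).sum := by
            simp only [dfsF, hk, if_false, hlook]
            congr 1
            apply List.map_congr_left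
            intro c hc
            have hcch : c ∈ childrenOf tree kill cur := by rw [childrenOf_eq hk hlook]; exact hc
            have hlt := kRank_lt hpre hcur0 hp hcch
            have hle := kRank_le tree kill cur
            exact dfs_stable hpre (kRank tree kill c) c tree.length (tree.length + 1)
              (reach0_children hcur0 hcch) (by omega) (by omega) (by omega)
          simp [hcur]; ring

-- ===== VERDICT (by name: the statement is the Claim_ definition above) =====
theorem bfs_spec : Claim_equal_bfs := by
  intro tree nodes_list kill _dom hpre
  unfold Spec_bfs
  have hw : wSum tree kill [0] < (childSum tree + 1) ^ tree.length + 1 := by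
    have h0 : wSum tree kill [0] = (childSum tree + 1) ^ kRank tree kill 0 := by simp [wSum]
    have h2 : (childSum tree + 1) ^ kRank tree kill 0 ≤ (childSum tree + 1) ^ tree.length :=
      Nat.pow_le_pow_right (by omega) (kRank_le tree kill 0)
    omega
  unfold bfs bfs_alt
  rw [bfs_to_dfs hpre _ [0] 0
    (by intro y hy; simp at hy; subst hy; exact self_mem_reachSet tree kill 0) hw]
  simp
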